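-- pv_equiv track=rewrite | github.com/CASY82/CHH_StudyRoom | Algo/etcCode/codetest_l_2.py | solution
-- ===== SOURCE A (Python) =====
-- research = ["yxxy","xxyyy","yz"]
--
-- n = 2
--
-- k = 1
--
-- def solution(research, n, k):
--     char_list = []
--     char_count = []
--     check = []
--
--     for i in range(len(research)):
--         for j in range(len(research[i])):
--             if research[i][j] not in char_list:
--                 char_list.append(research[i][j])
--
--     char_list.sort()
--     result = [0 for i in range(len(char_list))]
--
--     for i in range(len(research)):
--         for j in range(len(char_list)):
--             char_count.append(research[i].count(char_list[j]))
--
--     for i in range(len(char_count)):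
--         for j in range(len(char_list)):
--             if i % len(char_list) == j:
--                 result[j] += char_count[i]
--
--                 if char_count[i] > k and char_count[i] != 0:
--                     check.append(char_list[j])
--
--     for i in range(len(result)):
--         if result[i] >= n * 2 * k:
--             if check.count(char_list[i]) >= n:
--                 answer = char_list[i]
--                 break
--             else:
--                 answer = 'None'
--         else:
--             answer = 'None'
--
--     return answer
-- ===== SOURCE B (Python) =====
-- def solution(research, n, k):
--     answer = 'None'
--     for c in sorted(set(''.join(research))):
--         total = sum(s.count(c) for s in research)
--         qualified = sum(1 for s in research if s.count(c) > max(k, 0))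
--         if total >= 2 * n * k and qualified >= n:
--             answer = c
--             break
--     return answer
-- ===== Notes on version B (the rewrite author's own statement) =====
-- stated objective: simpler
-- what changed: A builds a dedup list, a flat string-by-char count table and a modulo-indexed pass accumulating per-char totals and a qualifying-occurrences list before a final scan; B makes one pass over sorted(set(''.join(research))) computing each character's total and qualifying-string count on the fly and returns the first qualifying character.
import Mathlib
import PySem

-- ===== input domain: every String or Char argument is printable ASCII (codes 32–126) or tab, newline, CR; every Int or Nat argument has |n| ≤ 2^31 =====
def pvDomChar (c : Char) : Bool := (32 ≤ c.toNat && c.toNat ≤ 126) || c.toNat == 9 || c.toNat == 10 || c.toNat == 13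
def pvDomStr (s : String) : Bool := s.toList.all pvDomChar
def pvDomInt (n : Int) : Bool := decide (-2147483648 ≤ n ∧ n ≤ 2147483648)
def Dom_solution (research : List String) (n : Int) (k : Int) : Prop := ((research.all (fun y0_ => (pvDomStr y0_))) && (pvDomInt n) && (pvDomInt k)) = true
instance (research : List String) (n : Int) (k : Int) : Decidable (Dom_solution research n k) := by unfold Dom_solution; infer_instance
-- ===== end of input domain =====

-- B replaces A's four index-based passes (dedup list, flat count table, modulo-indexed
-- accumulation) by one pass over the sorted distinct characters computing each character's
-- totals on the fly (objective: simpler).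

-- shared primitive wrapper: Python's s.count(c) for a single character c
def pvCnt (s : String) (c : Char) : Int := (PySem.Str.count s (String.singleton c) : Int)

-- ===== PORT A =====
-- the final 'for i in range(len(result)) … break' loop; the Option state is the 'answer'
-- variable (none = not yet assigned)
def pvALoop4 (charList : List Char) (result : List Int) (check : List Char) (n k : Int) :
    List Int → Option String → Option String
  | [], ans => ans
  | i :: rest, ans =>
    if PySem.List.pyGetD result i 0 ≥ n * 2 * k then
      if (PySem.List.count check (PySem.List.pyGetD charList i ' ') : Int) ≥ n then
        some (String.singleton (PySem.List.pyGetD charList i ' '))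
      else pvALoop4 charList result check n k rest (some "None")
    else pvALoop4 charList result check n k rest (some "None")

def solution (research : List String) (n : Int) (k : Int) : String :=
  let charList : List Char := research.foldl
    (fun acc s => s.toList.foldl (fun a c => if c ∈ a then a else a ++ [c]) acc) []
  let charList := PySem.List.sorted charList (fun x => x) false
  let result : List Int := (PySem.List.pyRange 0 (charList.length : Int) 1).map (fun _ => 0)
  let charCount : List Int := research.foldl
    (fun acc s => charList.foldl (fun a c => a ++ [pvCnt s c]) acc) []
  let st := (PySem.List.pyRange 0 (charCount.length : Int) 1).foldl
    (fun (st : List Int × List Char) i =>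
      (PySem.List.pyRange 0 (charList.length : Int) 1).foldl
        (fun (st : List Int × List Char) j =>
          if PySem.Int.mod i (charList.length : Int) = j then
            ( PySem.List.pySetD st.1 j
                (PySem.List.pyGetD st.1 j 0 + PySem.List.pyGetD charCount i 0),
              if PySem.List.pyGetD charCount i 0 > k ∧ PySem.List.pyGetD charCount i 0 ≠ 0 then
                st.2 ++ [PySem.List.pyGetD charList j ' ']
              else st.2 )
          else st) st)
    (result, ([] : List Char))
  -- none = the Python variable 'answer' was never assigned (UnboundLocalError; outside Pre_solution)
  (pvALoop4 charList st.1 st.2 n k (PySem.List.pyRange 0 (st.1.length : Int) 1) none).getD ""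

-- ===== PORT B =====
-- sorted(set(''.join(research)))
def pvBChars (research : List String) : List Char :=
  PySem.List.sorted (PySem.Set.ofList (PySem.Str.join "" research).toList) (fun x => x) false

-- the 'for c in …: if …: answer = c; break' loop (initial answer = 'None')
def pvBGo (research : List String) (n k : Int) : List Char → String
  | [] => "None"
  | c :: rest =>
    let total := research.foldl (fun a s => a + pvCnt s c) 0
    let qualified := research.foldl (fun a s => if pvCnt s c > max k 0 then a + 1 else a) (0 : Int)
    if total ≥ 2 * n * k ∧ qualified ≥ n then String.singleton c
    else pvBGo research n k rest

def solution_alt (research : List String) (n : Int) (k : Int) : String :=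
  pvBGo research n k (pvBChars research)

-- ===== PRECONDITION & SPEC =====
-- Pre_ excludes exactly the inputs where every string is empty: there A's 'answer' variable is
-- never assigned and the Python raises UnboundLocalError (no value is returned).
def Pre_solution (research : List String) (n : Int) (k : Int) : Prop :=
  research.any (fun s => !s.toList.isEmpty) = true
instance (research : List String) (n : Int) (k : Int) : Decidable (Pre_solution research n k) := by
  unfold Pre_solution; infer_instance
def pvWitness_solution : List String × Int × Int := (["ab", "b"], 1, 1)

def Spec_solution (research : List String) (n : Int) (k : Int) (out : String) : Prop :=
  out = solution_alt research n k
instance (research : List String) (n : Int) (k : Int) (out : String) :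
    Decidable (Spec_solution research n k out) := by unfold Spec_solution; infer_instance

-- ===== CLAIM (what is proved, stated in full; the proofs are below) =====
def Claim_equal_solution : Prop := ∀ (research : List String) (n : Int) (k : Int),
  Dom_solution research n k → Pre_solution research n k →
  Spec_solution research n k (solution research n k)

-- ===== LEMMAS AND PROOFS =====

def pvQual (k v : Int) : Bool := decide (v > k) && decide (v ≠ 0)
def pvStep (chars : List Char) (k : Int) (st : List Int × List Char) (p : Int × Int) :
    List Int × List Char :=
  ( PySem.List.pySetD st.1 (PySem.Int.mod p.1 (chars.length : Int))
      (PySem.List.pyGetD st.1 (PySem.Int.mod p.1 (chars.length : Int)) 0 + p.2),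
    if p.2 > k ∧ p.2 ≠ 0 then
      st.2 ++ [PySem.List.pyGetD chars (PySem.Int.mod p.1 (chars.length : Int)) ' ']
    else st.2 )
def pvApply (res : List Int) (j : Nat) (row : List Int) : List Int :=
  res.take j ++ (res.drop j).zipWith (· + ·) row
def pvCheckRow (k : Int) (cs : List Char) (row : List Int) : List Char :=
  ((cs.zip row).filter (fun p => pvQual k p.2)).map (·.1)

lemma pv_row_fold (chars : List Char) (k : Int) (row : List Int) :
    ∀ (j q : Nat) (res : List Int) (chk : List Char),
      j + row.length = chars.length → res.length = chars.length →
      (PySem.List.enumerate row ((q * chars.length + j : Nat) : Int)).foldl (pvStep chars k) (res, chk)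
      = (pvApply res j row, chk ++ pvCheckRow k (chars.drop j) row) := by
  induction row with
  | nil =>
    intro j q res chk hj hres
    simp only [List.length_nil, Nat.add_zero] at hj
    subst hj
    simp [PySem.List.enumerate, pvApply, pvCheckRow, List.take_of_length_le (le_of_eq hres)]
  | cons v row' ih =>
    intro j q res chk hj hres
    have hjL : j < chars.length := by simp at hj; omega
    have hjres : j < res.length := by omega
    rw [PySem.List.enumerate_cons]
    rw [List.foldl_cons]
    have hmod : PySem.Int.mod ((q * chars.length + j : Nat) : Int) (chars.length : Int) = (j : Int) := by
      rw [PySem.Int.mod_natCast]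
      congr 1
      rw [Nat.mul_add_mod']
      exact Nat.mod_eq_of_lt hjL
    have hstep : pvStep chars k (res, chk) (((q * chars.length + j : Nat) : Int), v)
        = (res.set j (res.getD j 0 + v),
           if v > k ∧ v ≠ 0 then chk ++ [chars.getD j ' '] else chk) := by
      simp only [pvStep]
      rw [hmod]
      simp only [PySem.List.pySetD_natCast, PySem.List.pyGetD_natCast]
    rw [hstep]
    have hcast : ((q * chars.length + j : Nat) : Int) + 1 = ((q * chars.length + (j+1) : Nat) : Int) := by
      push_cast; ring
    rw [hcast]
    rw [ih (j+1) q _ _ (by simp at hj ⊢; omega) (by simp [hres])]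
    rw [Prod.mk.injEq]
    refine ⟨?_, ?_⟩
    · -- pvApply equality
      show pvApply (res.set j (res.getD j 0 + v)) (j+1) row' = pvApply res j (v :: row')
      unfold pvApply
      rw [List.drop_eq_getElem_cons hjres]
      simp only [List.zipWith_cons_cons]
      rw [List.take_set, List.take_add_one]
      rw [List.drop_set]
      have h1 : (List.take j res ++ res[j]?.toList).set j (res.getD j 0 + v)
          = List.take j res ++ [res[j] + v] := by
        rw [List.getElem?_eq_getElem hjres]
        rw [List.set_append_right _ _ (by simp)]
        simp [List.length_take, Nat.min_eq_left (le_of_lt hjres),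
          List.getD_eq_getElem?_getD, List.getElem?_eq_getElem hjres]
      rw [h1]
      simp
    · -- check equality
      show (if v > k ∧ v ≠ 0 then chk ++ [chars.getD j ' '] else chk)
            ++ pvCheckRow k (chars.drop (j+1)) row'
          = chk ++ pvCheckRow k (chars.drop j) (v :: row')
      rw [List.drop_eq_getElem_cons hjL]
      unfold pvCheckRow
      simp only [List.zip_cons_cons, List.filter_cons]
      by_cases h : v > k ∧ v ≠ 0
      · simp [h, pvQual, List.getD_eq_getElem?_getD, List.getElem?_eq_getElem hjL]
      · have : pvQual k v = false := by
          simp [pvQual]; omega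
        simp [h, this]

lemma pv_rows_fold (chars : List Char) (k : Int) :
    ∀ (rows : List (List Int)) (q : Nat) (res : List Int) (chk : List Char),
      (∀ r ∈ rows, r.length = chars.length) → res.length = chars.length →
      (PySem.List.enumerate rows.flatten ((q * chars.length : Nat) : Int)).foldl (pvStep chars k) (res, chk)
      = (rows.foldl (fun a r => a.zipWith (· + ·) r) res,
         chk ++ (rows.map (pvCheckRow k chars)).flatten) := by
  intro rows
  induction rows with
  | nil => intro q res chk _ _; simp [PySem.List.enumerate_nil]
  | cons row rest ih =>
    intro q res chk hrows hres
    have hrow : row.length = chars.length := hrows row (List.mem_cons_self)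
    rw [List.flatten_cons, PySem.List.enumerate_append, List.foldl_append]
    have h0 : ((q * chars.length : Nat) : Int) = ((q * chars.length + 0 : Nat) : Int) := by norm_num
    rw [h0, pv_row_fold chars k row 0 q res chk (by omega) hres]
    have hoff : ((q * chars.length + 0 : Nat) : Int) + (row.length : Int)
        = (((q+1) * chars.length : Nat) : Int) := by push_cast [hrow]; ring
    rw [hoff]
    have happlen : (pvApply res 0 row).length = chars.length := by
      simp [pvApply, hres, hrow]
    rw [ih (q+1) _ _ (fun r hr => hrows r (List.mem_cons_of_mem _ hr)) happlen]
    simp [pvApply, pvCheckRow]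

lemma pv_foldl_ite_of_not_mem {α : Type} (g : Int → α → α) (t : Int) :
    ∀ (js : List Int), t ∉ js → ∀ st,
      js.foldl (fun st j => if t = j then g j st else st) st = st := by
  intro js
  induction js with
  | nil => intro _ st; rfl
  | cons a l ih =>
    intro h st
    simp only [List.mem_cons, not_or] at h
    simp only [List.foldl_cons, if_neg h.1]
    exact ih h.2 st
lemma pv_foldl_ite_single {α : Type} (g : Int → α → α) (t : Int) :
    ∀ (js : List Int), js.Nodup → t ∈ js → ∀ st,
      js.foldl (fun st j => if t = j then g j st else st) st = g t st := by
  intro js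
  induction js with
  | nil => intro _ h; simp at h
  | cons a l ih =>
    intro hnd hmem st
    rcases List.mem_cons.mp hmem with h | h
    · subst h
      simp only [List.foldl_cons, if_pos]
      exact pv_foldl_ite_of_not_mem g t l (List.nodup_cons.mp hnd).1 _
    · have hne : t ≠ a := by rintro rfl; exact (List.nodup_cons.mp hnd).1 h
      simp only [List.foldl_cons, if_neg hne]
      exact ih (List.nodup_cons.mp hnd).2 h st

lemma pv_loop3_eq (chars : List Char) (k : Int) (hL : 0 < chars.length)
    (cc : List Int) (st0 : List Int × List Char) :
    (PySem.List.pyRange 0 (cc.length : Int) 1).foldl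
      (fun (st : List Int × List Char) i =>
        (PySem.List.pyRange 0 (chars.length : Int) 1).foldl
          (fun (st : List Int × List Char) j =>
            if PySem.Int.mod i (chars.length : Int) = j then
              ( PySem.List.pySetD st.1 j
                  (PySem.List.pyGetD st.1 j 0 + PySem.List.pyGetD cc i 0),
                if PySem.List.pyGetD cc i 0 > k ∧ PySem.List.pyGetD cc i 0 ≠ 0 then
                  st.2 ++ [PySem.List.pyGetD chars j ' ']
                else st.2 )
            else st) st) st0
    = (PySem.List.enumerate cc 0).foldl (pvStep chars k) st0 := by
  have hL' : (0 : Int) < (chars.length : Int) := by exact_mod_cast hL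
  rw [PySem.List.enumerate_eq_map_pyRange cc 0, PySem.List.len_eq, List.foldl_map]
  apply PySem.List.foldl_congr_mem
  intro st i _
  have hmem : PySem.Int.mod i (chars.length : Int) ∈ PySem.List.pyRange 0 (chars.length : Int) 1 :=
    PySem.List.mem_pyRange_one.mpr ⟨PySem.Int.mod_nonneg i hL', PySem.Int.mod_lt i hL'⟩
  rw [pv_foldl_ite_single
      (fun j st => ( PySem.List.pySetD st.1 j (PySem.List.pyGetD st.1 j 0 + PySem.List.pyGetD cc i 0),
        if PySem.List.pyGetD cc i 0 > k ∧ PySem.List.pyGetD cc i 0 ≠ 0 then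
          st.2 ++ [PySem.List.pyGetD chars j ' '] else st.2 ))
      (PySem.Int.mod i (chars.length : Int)) _ (PySem.List.nodup_pyRange_one 0 _) hmem st]
  rfl

lemma pv_zipWith_map_same {α β : Type} (f : β → β → β) (g h : α → β) (l : List α) :
    List.zipWith f (l.map g) (l.map h) = l.map (fun x => f (g x) (h x)) := by
  induction l with
  | nil => rfl
  | cons a t ih => simp [ih]

lemma pv_zip_map_self {α β : Type} (f : α → β) (l : List α) :
    l.zip (l.map f) = l.map (fun x => (x, f x)) := by
  induction l with
  | nil => rfl
  | cons a t ih => simp [ih]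

lemma pv_fold_zip (chars : List Char) :
    ∀ (research : List String) (g : Char → Int),
      research.foldl (fun a s => a.zipWith (· + ·) (chars.map (pvCnt s))) (chars.map g)
      = chars.map (fun c => research.foldl (fun a s => a + pvCnt s c) (g c)) := by
  intro research
  induction research with
  | nil => intro g; simp
  | cons s rest ih =>
    intro g
    simp only [List.foldl_cons]
    rw [pv_zipWith_map_same]
    exact ih (fun c => g c + pvCnt s c)

lemma pv_checkRow_filter (chars : List Char) (k : Int) (s : String) :
    pvCheckRow k chars (chars.map (pvCnt s))
    = chars.filter (fun c => pvQual k (pvCnt s c)) := by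
  unfold pvCheckRow
  rw [pv_zip_map_self]
  rw [List.filter_map]
  rw [List.map_map]
  simp [Function.comp_def]

lemma pv_count_check (chars : List Char) (hnd : chars.Nodup) (k : Int) (research : List String)
    (c : Char) (hc : c ∈ chars) :
    List.count c ((research.map (fun s => chars.filter (fun c => pvQual k (pvCnt s c)))).flatten)
    = research.countP (fun s => pvQual k (pvCnt s c)) := by
  rw [List.count_flatten, List.map_map]
  induction research with
  | nil => simp
  | cons s rest ih =>
    simp only [List.map_cons, List.sum_cons, List.countP_cons, Function.comp_def] at ih ⊢
    rw [ih]
    by_cases h : pvQual k (pvCnt s c) = true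
    · rw [List.count_filter (p := fun c => pvQual k (pvCnt s c)) h, List.count_eq_one_of_mem hnd hc]
      simp [h]; omega
    · have : c ∉ chars.filter (fun c => pvQual k (pvCnt s c)) := by
        simp [List.mem_filter, h]
      rw [List.count_eq_zero_of_not_mem this]
      simp [h]

lemma pv_qual_fold (research : List String) (c : Char) (k : Int) :
    research.foldl (fun a s => if pvCnt s c > max k 0 then a + 1 else a) (0 : Int)
    = (research.countP (fun s => pvQual k (pvCnt s c)) : Int) := by
  have hb : ∀ (a : Int) (s : String),
      (if pvCnt s c > max k 0 then a + 1 else a)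
      = (if pvQual k (pvCnt s c) = true then a + 1 else a) := by
    intro a s
    have hnn : 0 ≤ pvCnt s c := by simp [pvCnt]
    by_cases h : pvCnt s c > max k 0
    · rw [if_pos h, if_pos (by simp [pvQual]; omega)]
    · rw [if_neg h, if_neg (by simp [pvQual]; omega)]
  calc research.foldl (fun a s => if pvCnt s c > max k 0 then a + 1 else a) (0 : Int)
      = research.foldl (fun a s => if pvQual k (pvCnt s c) = true then a + 1 else a) (0 : Int) := by
        apply PySem.List.foldl_congr_mem
        intro a s _
        exact hb a s
    _ = (research.countP (fun s => pvQual k (pvCnt s c)) : Int) := by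
        rw [PySem.List.foldl_count_if]; simp

lemma pv_loop4_eq (research : List String) (chars : List Char) (n k : Int)
    (res : List Int) (chk : List Char)
    (htotal : res = chars.map (fun c => research.foldl (fun a s => a + pvCnt s c) 0))
    (hcount : ∀ c ∈ chars, (List.count c chk)
        = research.countP (fun s => pvQual k (pvCnt s c))) :
    ∀ (m j : Nat), chars.length - j = m → j < chars.length → ∀ (ans : Option String),
      pvALoop4 chars res chk n k (PySem.List.pyRange (j : Int) (chars.length : Int) 1) ans
      = some (pvBGo research n k (chars.drop j)) := by
  intro m
  induction m with
  | zero => intro j hm hj; omega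
  | succ m ih =>
    intro j hm hj ans
    have hmul : n * 2 * k = 2 * n * k := by ring
    have hjres : j < res.length := by simp [htotal]; omega
    rw [PySem.List.pyRange_one_cons (by exact_mod_cast hj)]
    have hget : PySem.List.pyGetD res (j : Int) 0
        = research.foldl (fun a s => a + pvCnt s (chars[j])) 0 := by
      rw [PySem.List.pyGetD_natCast, List.getD_eq_getElem?_getD, List.getElem?_eq_getElem hjres]
      subst htotal
      simp
    have hgetc : PySem.List.pyGetD chars (j : Int) ' ' = chars[j] := by
      rw [PySem.List.pyGetD_natCast, List.getD_eq_getElem?_getD, List.getElem?_eq_getElem hj]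
      rfl
    have hcnt : (PySem.List.count chk (chars[j]) : Int)
        = research.foldl (fun a s => if pvCnt s (chars[j]) > max k 0 then a + 1 else a) (0 : Int) := by
      rw [pv_qual_fold, PySem.List.count_eq, hcount (chars[j]) (List.getElem_mem hj)]
    have hdrop : chars.drop j = chars[j] :: chars.drop (j+1) := List.drop_eq_getElem_cons hj
    rw [hdrop]
    show (if PySem.List.pyGetD res (j:Int) 0 ≥ n * 2 * k then _ else _) = _
    conv_rhs => rw [pvBGo]
    simp only [hget, hgetc, hcnt]
    by_cases h1 : research.foldl (fun a s => a + pvCnt s (chars[j])) 0 ≥ n * 2 * k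
    · by_cases h2 : research.foldl (fun a s => if pvCnt s (chars[j]) > max k 0 then a + 1 else a) (0:Int) ≥ n
      · rw [if_pos h1, if_pos h2, if_pos ⟨hmul ▸ h1, h2⟩]
      · rw [if_pos h1, if_neg h2, if_neg (by intro hcon; exact h2 hcon.2)]
        -- recurse
        rcases Nat.lt_or_ge (j+1) chars.length with hlt | hge
        · have := ih (j+1) (by omega) hlt (some "None")
          rw [show ((j:Int) + 1) = ((j+1 : Nat) : Int) by push_cast; ring]
          exact this
        · rw [show ((j:Int) + 1) = ((j+1 : Nat) : Int) by push_cast; ring,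
             PySem.List.pyRange_one_eq_nil (by exact_mod_cast hge)]
          rw [List.drop_eq_nil_of_le hge]
          rfl
    · rw [if_neg h1, if_neg (by intro hcon; exact h1 (hmul ▸ hcon.1))]
      rcases Nat.lt_or_ge (j+1) chars.length with hlt | hge
      · have := ih (j+1) (by omega) hlt (some "None")
        rw [show ((j:Int) + 1) = ((j+1 : Nat) : Int) by push_cast; ring]
        exact this
      · rw [show ((j:Int) + 1) = ((j+1 : Nat) : Int) by push_cast; ring,
           PySem.List.pyRange_one_eq_nil (by exact_mod_cast hge)]
        rw [List.drop_eq_nil_of_le hge]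
        rfl

lemma pv_intercalate_nil {α : Type} (css : List (List α)) : ([] : List α).intercalate css = css.flatten := by
  induction css with
  | nil => rfl
  | cons h t ih =>
    cases t with
    | nil => simp [List.intercalate]
    | cons h' t' =>
      simp only [List.intercalate] at ih ⊢
      rw [List.intersperse_cons₂, List.flatten_cons, List.flatten_cons, ih]
      simp

lemma pv_join_toList (research : List String) :
    (PySem.Str.join "" research).toList = (research.map String.toList).flatten := by
  rw [PySem.Str.toList_join]
  show PySem.Chars.join "".toList (research.map String.toList) = _
  have : "".toList = ([] : List Char) := rfl
  rw [this]
  show List.intercalate [] (research.map String.toList) = _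
  exact pv_intercalate_nil _

lemma pv_charlist_eq (research : List String) :
    research.foldl (fun acc s => s.toList.foldl (fun a c => if c ∈ a then a else a ++ [c]) acc) []
    = PySem.Set.ofList ((research.map String.toList).flatten) := by
  rw [PySem.Set.ofList_eq_foldl, List.foldl_flatten, List.foldl_map]
  congr 1
  funext a s
  congr 1
  funext b c
  show (if c ∈ b then b else b ++ [c]) = PySem.Set.add b c
  rw [PySem.Set.add]
  by_cases h : c ∈ b
  · rw [if_pos h, if_pos (by simpa [PySem.Set.contains] using h)]
  · rw [if_neg h, if_neg (by simpa [PySem.Set.contains] using h)]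

-- ===== VERDICT (by name: the statement is the Claim_ definition above) =====
theorem solution_spec : Claim_equal_solution := by
  intro research n k _ hpre
  unfold Spec_solution solution solution_alt
  simp only [pv_charlist_eq, ← pv_join_toList]
  rw [show (PySem.List.sorted (PySem.Set.ofList (PySem.Str.join "" research).toList) fun x => x)
      = pvBChars research from rfl]
  set C := pvBChars research with hC
  -- basic facts about C
  have hpw : C.Pairwise (· < ·) := by
    rw [hC]; unfold pvBChars
    exact PySem.List.sorted_ofList_pairwise_lt _
  have hnd : C.Nodup := hpw.imp ne_of_lt
  have hne : C ≠ [] := by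
    obtain ⟨s0, hs0mem, hs0⟩ : ∃ s ∈ research, s.toList ≠ [] := by
      unfold Pre_solution at hpre
      simpa [List.any_eq_true, List.isEmpty_iff] using hpre
    obtain ⟨c, hc⟩ := List.exists_mem_of_ne_nil _ hs0
    have hcJ : c ∈ (PySem.Str.join "" research).toList := by
      rw [pv_join_toList]
      exact List.mem_flatten.mpr ⟨s0.toList, List.mem_map_of_mem hs0mem, hc⟩
    have : c ∈ C := by
      rw [hC]; unfold pvBChars
      rw [PySem.List.mem_sorted]
      exact (PySem.Set.mem_ofList _ _).mpr hcJ
    exact List.ne_nil_of_mem this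
  have hL : 0 < C.length := List.length_pos_of_ne_nil hne
  -- the count table is the flattened rows
  have hcc : (List.foldl (fun acc s => List.foldl (fun a c => a ++ [pvCnt s c]) acc C) [] research)
      = (research.map (fun s => C.map (pvCnt s))).flatten := by
    simp only [PySem.List.foldl_append_singleton_eq_map]
    rw [PySem.List.foldl_append_eq_flatMap, List.flatMap_def]
    rfl
  rw [hcc]
  rw [pv_loop3_eq C k hL]
  -- initial result list = C.map (fun _ => 0)
  have hres0 : (PySem.List.pyRange 0 (C.length : Int) 1).map (fun _ => (0 : Int))
      = C.map (fun _ => (0 : Int)) := by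
    apply List.ext_getElem
    · simp [PySem.List.length_pyRange_one]
    · intro i h1 h2; simp
  rw [hres0]
  -- collapse the modulo loop into per-row folds
  have hrows := pv_rows_fold C k (research.map (fun s => C.map (pvCnt s))) 0
      (C.map (fun _ => (0 : Int))) []
      (by intro r hr; obtain ⟨s, _, rfl⟩ := List.mem_map.mp hr; simp)
      (by simp)
  rw [show ((0 * C.length : Nat) : Int) = (0 : Int) by simp] at hrows
  rw [hrows]
  -- the accumulated result row is the per-character totals
  have htotal : (research.map (fun s => C.map (pvCnt s))).foldl (fun a r => a.zipWith (· + ·) r)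
        (C.map (fun _ => (0 : Int)))
      = C.map (fun c => research.foldl (fun a s => a + pvCnt s c) 0) := by
    rw [List.foldl_map]
    exact pv_fold_zip C research (fun _ => 0)
  -- the check list counts qualifying strings
  have hchk : ([] : List Char) ++ ((research.map (fun s => C.map (pvCnt s))).map (pvCheckRow k C)).flatten
      = (research.map (fun s => C.filter (fun c => pvQual k (pvCnt s c)))).flatten := by
    rw [List.nil_append, List.map_map]
    congr 1
    apply List.map_congr_left
    intro s _
    exact pv_checkRow_filter C k s
  rw [htotal, hchk]
  have hcount : ∀ c ∈ C,
      List.count c ((research.map (fun s => C.filter (fun c => pvQual k (pvCnt s c)))).flatten)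
      = research.countP (fun s => pvQual k (pvCnt s c)) := by
    intro c hc
    exact pv_count_check C hnd k research c hc
  have h4 := pv_loop4_eq research C n k
      (C.map (fun c => research.foldl (fun a s => a + pvCnt s c) 0))
      ((research.map (fun s => C.filter (fun c => pvQual k (pvCnt s c)))).flatten)
      rfl hcount C.length 0 (by omega) hL none
  simp only [Nat.cast_zero, List.drop_zero] at h4
  rw [show ((C.map (fun c => research.foldl (fun a s => a + pvCnt s c) 0)).length : Int)
      = (C.length : Int) by simp]
  rw [h4]
  rfl
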